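-- pv_equiv track=rewrite | github.com/scikit-learn/scikit-learn | sklearn-env/lib/python3.9/site-packages/_pytest/nodes.py | iterparentnodeids
-- ===== SOURCE A (Python) =====
-- from typing import Iterator
--
-- SEP = "/"
--
-- def iterparentnodeids(nodeid: str) -> Iterator[str]:
--     """Return the parent node IDs of a given node ID, inclusive.
--
--     For the node ID
--
--         "testing/code/test_excinfo.py::TestFormattedExcinfo::test_repr_source"
--
--     the result would be
--
--         ""
--         "testing"
--         "testing/code"
--         "testing/code/test_excinfo.py"
--         "testing/code/test_excinfo.py::TestFormattedExcinfo"
--         "testing/code/test_excinfo.py::TestFormattedExcinfo::test_repr_source"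
--
--     Note that :: parts are only considered at the last / component.
--     """
--     pos = 0
--     sep = SEP
--     yield ""
--     while True:
--         at = nodeid.find(sep, pos)
--         if at == -1 and sep == SEP:
--             sep = "::"
--         elif at == -1:
--             if nodeid:
--                 yield nodeid
--             break
--         else:
--             if at:
--                 yield nodeid[:at]
--             pos = at + len(sep)
-- ===== SOURCE B (Python) =====
-- def iterparentnodeids(nodeid):
--     yield ""
--     parts = nodeid.split("/")
--     cur = None
--     for part in parts[:-1]:
--         cur = part if cur is None else cur + "/" + part
--         if cur:
--             yield cur
--     head = nodeid[: len(nodeid) - len(parts[-1])]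
--     cur = None
--     for seg in parts[-1].split("::")[:-1]:
--         cur = seg if cur is None else cur + "::" + seg
--         if head or cur:
--             yield head + cur
--     if nodeid:
--         yield nodeid
-- ===== Notes on version B (the rewrite author's own statement) =====
-- stated objective: simpler
-- what changed: Replaces A's single advancing find/pos state machine with a split-and-accumulate decomposition: split the nodeid on '/' and yield running '/'-joins of the components, then split the last component on '::' and yield the head path plus running '::'-joins, finally the full nodeid.
import Mathlib
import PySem

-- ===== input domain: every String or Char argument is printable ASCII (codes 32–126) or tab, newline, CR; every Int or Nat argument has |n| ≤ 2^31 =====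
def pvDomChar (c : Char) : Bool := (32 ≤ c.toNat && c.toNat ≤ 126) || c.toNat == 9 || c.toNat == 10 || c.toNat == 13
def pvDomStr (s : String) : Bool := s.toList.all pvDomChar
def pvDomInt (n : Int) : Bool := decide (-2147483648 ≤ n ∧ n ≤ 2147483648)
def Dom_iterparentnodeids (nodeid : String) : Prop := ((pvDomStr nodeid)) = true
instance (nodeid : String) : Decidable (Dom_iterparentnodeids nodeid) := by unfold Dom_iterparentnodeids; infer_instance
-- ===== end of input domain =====

-- B replaces A's advancing find/pos state machine by a split-and-accumulate decomposition
-- (split on "/", yield running joins, then split the last component on "::"): simpler, same cost.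


-- ===== PORT A =====
-- A's while-True loop: state (pos, sep), `at = nodeid.find(sep, pos)`; the fuel only makes the
-- recursion structural (2*len+2 steps always suffice: pos grows at each found separator).
def iterAuxA (nodeid : List Char) (sep : List Char) (pos : Nat) (fuel : Nat) : List (List Char) :=
  match fuel with
  | 0 => []
  | fuel + 1 =>
    let a := PySem.Chars.findFrom nodeid sep (pos : Int) none
    if a = -1 then
      if sep = ['/'] then iterAuxA nodeid [':', ':'] pos fuel
      else if nodeid ≠ [] then [nodeid] else []
    else
      (if a ≠ 0 then [nodeid.take a.toNat] else []) ++ iterAuxA nodeid sep (a.toNat + sep.length) fuel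

def iterparentnodeids (nodeid : String) : List String :=
  let cs := nodeid.toList
  "" :: (iterAuxA cs ['/'] 0 (2 * cs.length + 2)).map String.ofList

-- ===== PORT B =====
-- Source B's first loop: running "/"-join `cur` over parts[:-1], yielding the non-empty joins.
def altLoop1 : List (List Char) → Option (List Char) → List (List Char)
  | [], _ => []
  | part :: rest, cur =>
    let cur' := match cur with | none => part | some c => c ++ ['/'] ++ part
    (if cur' ≠ [] then [cur'] else []) ++ altLoop1 rest (some cur')

-- Source B's second loop: running "::"-join over segs[:-1], yielding head ++ join when non-empty.
def altLoop2 (head : List Char) : List (List Char) → Option (List Char) → List (List Char)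
  | [], _ => []
  | seg :: rest, cur =>
    let cur' := match cur with | none => seg | some c => c ++ [':', ':'] ++ seg
    (if head ≠ [] ∨ cur' ≠ [] then [head ++ cur'] else []) ++ altLoop2 head rest (some cur')

def iterparentnodeids_alt (nodeid : String) : List String :=
  let cs := nodeid.toList
  let parts := PySem.Chars.splitOn cs ['/']
  -- parts[-1]: Python's split never returns an empty list, so the lookup always hits
  let last := (PySem.List.pyGet? parts (-1)).getD []
  -- nodeid[: len(nodeid) - len(parts[-1])]
  let head := PySem.List.slice cs none (some ((cs.length : Int) - (last.length : Int)))
  let segs := PySem.Chars.splitOn last [':', ':']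
  "" :: ((altLoop1 parts.dropLast none
        ++ (altLoop2 head segs.dropLast none
        ++ (if cs ≠ [] then [cs] else []))).map String.ofList)

-- ===== PRECONDITION & SPEC =====
def Spec_iterparentnodeids (nodeid : String) (out : List String) : Prop := out = iterparentnodeids_alt nodeid
instance (nodeid : String) (out : List String) : Decidable (Spec_iterparentnodeids nodeid out) := by unfold Spec_iterparentnodeids; infer_instance

-- ===== CLAIM (what is proved, stated in full; the proofs are below) =====
def Claim_equal_iterparentnodeids : Prop := ∀ (nodeid : String), Dom_iterparentnodeids nodeid → Spec_iterparentnodeids nodeid (iterparentnodeids nodeid)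

-- ===== LEMMAS AND PROOFS =====
def msp (s0 : Char) (sr : List Char) : List Char → List (List Char)
  | [] => [[]]
  | c :: rest =>
    if (s0 :: sr).isPrefixOf (c :: rest) then
      [] :: msp s0 sr ((c :: rest).drop (s0 :: sr).length)
    else (msp s0 sr rest).modifyHead (c :: ·)
termination_by l => l.length
decreasing_by
  all_goals (simp only [List.length_drop, List.length_cons]; omega)

theorem msp_cons (s0 : Char) (sr : List Char) (c : Char) (rest : List Char) :
    msp s0 sr (c :: rest) =
      if (s0 :: sr).isPrefixOf (c :: rest) then
        [] :: msp s0 sr ((c :: rest).drop (s0 :: sr).length)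
      else (msp s0 sr rest).modifyHead (c :: ·) := by
  rw [msp.eq_def]

theorem msp_ne_nil (s0 : Char) (sr l : List Char) : msp s0 sr l ≠ [] := by
  fun_induction msp s0 sr l with
  | case1 => simp
  | case2 c rest h ih => simp
  | case3 c rest h ih =>
    intro hc
    exact ih (by simpa using congrArg List.length hc)

theorem msp_no_occ (s0 : Char) (sr : List Char) : ∀ l : List Char, ¬ (s0 :: sr) <:+: l →
    msp s0 sr l = [l] := by
  intro l
  fun_induction msp s0 sr l with
  | case1 => intro _; rfl
  | case2 c rest h ih =>
    intro hocc
    exact absurd ((List.isPrefixOf_iff_prefix.mp h).isInfix) hocc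
  | case3 c rest h ih =>
    intro hocc
    rw [ih (fun hi => hocc (hi.trans (List.suffix_cons c rest).isInfix))]
    rfl

theorem join_msp (s0 : Char) (sr l : List Char) :
    PySem.Chars.join (s0 :: sr) (msp s0 sr l) = l := by
  fun_induction msp s0 sr l with
  | case1 => exact PySem.Chars.join_singleton _ _
  | case2 c rest h ih =>
    obtain ⟨b, t, hb⟩ : ∃ b t, msp s0 sr ((c :: rest).drop (s0 :: sr).length) = b :: t := by
      rcases hx : msp s0 sr ((c :: rest).drop (s0 :: sr).length) with _ | ⟨b, t⟩
      · exact absurd hx (msp_ne_nil _ _ _)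
      · exact ⟨b, t, rfl⟩
    rw [hb]
    rw [PySem.Chars.join_cons_cons]
    rw [hb] at ih; rw [ih]
    simp only [List.nil_append]
    exact List.prefix_iff_eq_append.mp (List.isPrefixOf_iff_prefix.mp h)
  | case3 c rest h ih =>
    obtain ⟨b, t, hb⟩ : ∃ b t, msp s0 sr rest = b :: t := by
      rcases hx : msp s0 sr rest with _ | ⟨b, t⟩
      · exact absurd hx (msp_ne_nil _ _ _)
      · exact ⟨b, t, rfl⟩
    rw [hb]; rw [hb] at ih
    cases t with
    | nil =>
      simp only [List.modifyHead, PySem.Chars.join_singleton] at *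
      rw [← ih]
    | cons q qs =>
      simp only [List.modifyHead, PySem.Chars.join_cons_cons] at *
      rw [← ih]; rfl

theorem msp_first_occ (s0 : Char) (sr : List Char) (k : Nat) :
    ∀ l : List Char, (s0 :: sr) <+: l.drop k → (∀ i < k, ¬ (s0 :: sr) <+: l.drop i) →
      msp s0 sr l = l.take k :: msp s0 sr (l.drop (k + sr.length + 1)) := by
  induction k with
  | zero =>
    intro l hpre _
    simp only [List.drop_zero] at hpre
    rcases l with _ | ⟨c, rest⟩
    · exact absurd (List.prefix_nil.mp hpre) (by simp)
    · rw [msp_cons, if_pos (List.isPrefixOf_iff_prefix.mpr hpre)]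
      simp
  | succ k ih =>
    intro l hpre hmin
    rcases l with _ | ⟨c, rest⟩
    · rw [List.drop_nil] at hpre
      exact absurd (List.prefix_nil.mp hpre) (List.cons_ne_nil s0 sr)
    · have hnot : ¬ (s0 :: sr).isPrefixOf (c :: rest) := by
        intro hp
        exact hmin 0 (Nat.succ_pos _) (by simpa using List.isPrefixOf_iff_prefix.mp hp)
      rw [msp_cons, if_neg hnot]
      rw [ih rest (by simpa using hpre)
        (fun i hi => by simpa using hmin (i+1) (by omega))]
      have h2 : k + 1 + sr.length + 1 = (k + sr.length + 1) + 1 := by omega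
      rw [h2]
      simp [List.take_succ_cons, List.drop_succ_cons]


theorem go_eq_msp (s0 : Char) (sr : List Char) :
    ∀ (fuel : Nat) (l cur : List Char) (acc : List (List Char)), l.length ≤ fuel →
      PySem.Chars.splitOn.go (s0 :: sr) fuel l cur acc
        = acc.reverse ++ (msp s0 sr l).modifyHead (cur.reverse ++ ·) := by
  intro fuel
  induction fuel with
  | zero =>
    intro l cur acc hl
    have : l = [] := List.length_eq_zero_iff.mp (Nat.le_zero.mp hl)
    subst this
    simp [PySem.Chars.splitOn.go, msp]
  | succ fuel ih =>
    intro l cur acc hl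
    rcases l with _ | ⟨c, rest⟩
    · simp [PySem.Chars.splitOn.go, msp]
    · rw [PySem.Chars.splitOn.go]
      by_cases h : (s0 :: sr).isPrefixOf (c :: rest)
      · rw [if_pos h]
        rw [ih _ _ _ (by simp at hl ⊢; omega)]
        obtain ⟨b, t, hb⟩ : ∃ b t, msp s0 sr ((c :: rest).drop (s0 :: sr).length) = b :: t := by
          rcases hx : msp s0 sr ((c :: rest).drop (s0 :: sr).length) with _ | ⟨b, t⟩
          · exact absurd hx (msp_ne_nil _ _ _)
          · exact ⟨b, t, rfl⟩
        rw [msp_cons, if_pos h, hb]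
        simp
      · rw [if_neg h]
        rw [ih _ _ _ (by simp at hl ⊢; omega)]
        obtain ⟨b, t, hb⟩ : ∃ b t, msp s0 sr rest = b :: t := by
          rcases hx : msp s0 sr rest with _ | ⟨b, t⟩
          · exact absurd hx (msp_ne_nil _ _ _)
          · exact ⟨b, t, rfl⟩
        rw [msp_cons, if_neg h, hb]
        simp

theorem splitOn_eq_msp (s0 : Char) (sr l : List Char) :
    PySem.Chars.splitOn l (s0 :: sr) = msp s0 sr l := by
  rw [PySem.Chars.splitOn, go_eq_msp s0 sr (l.length + 1) l [] [] (by omega)]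
  obtain ⟨b, t, hb⟩ : ∃ b t, msp s0 sr l = b :: t := by
    rcases hx : msp s0 sr l with _ | ⟨b, t⟩
    · exact absurd hx (msp_ne_nil _ _ _)
    · exact ⟨b, t, rfl⟩
  rw [hb]; simp

theorem getLast_suffix_join (sep : List Char) :
    ∀ pieces : List (List Char), pieces ≠ [] →
      (pieces.getLast?.getD []) <:+ PySem.Chars.join sep pieces := by
  intro pieces
  induction pieces with
  | nil => intro h; exact absurd rfl h
  | cons a rest ih =>
    intro _
    rcases rest with _ | ⟨b, t⟩
    · simp [PySem.Chars.join_singleton]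
    · rw [PySem.Chars.join_cons_cons]
      have := ih (List.cons_ne_nil b t)
      simp only [List.getLast?_cons_cons]
      calc ((b :: t).getLast?.getD []) <:+ PySem.Chars.join sep (b :: t) := by simpa using this
        _ <:+ a ++ sep ++ PySem.Chars.join sep (b :: t) := List.suffix_append _ _


def ph2 (cs : List Char) : Nat → List (List Char) → List (List Char)
  | _, [] => []
  | _, [_] => if cs ≠ [] then [cs] else []
  | pos, piece :: next :: rest =>
    (if pos + piece.length ≠ 0 then [cs.take (pos + piece.length)] else [])
      ++ ph2 cs (pos + piece.length + 2) (next :: rest)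

def ph1 (cs : List Char) : Nat → List (List Char) → List (List Char)
  | _, [] => []
  | pos, [_] => ph2 cs pos (msp ':' [':'] (cs.drop pos))
  | pos, piece :: next :: rest =>
    (if pos + piece.length ≠ 0 then [cs.take (pos + piece.length)] else [])
      ++ ph1 cs (pos + piece.length + 1) (next :: rest)

theorem L2 (cs : List Char) :
    ∀ fuel pos, pos ≤ cs.length → cs.length - pos + 1 ≤ fuel →
      iterAuxA cs [':', ':'] pos fuel = ph2 cs pos (msp ':' [':'] (cs.drop pos)) := by
  intro fuel
  induction fuel with
  | zero => intro pos h1 h2; omega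
  | succ fuel ih =>
    intro pos hpos hfuel
    rw [iterAuxA]
    rw [PySem.Chars.findFrom_natCast cs [':', ':'] pos hpos]
    by_cases h : PySem.Chars.find (cs.drop pos) [':', ':'] = -1
    · rw [if_pos (by rw [h]; rfl)]
      rw [if_neg (by decide)]
      rw [msp_no_occ ':' [':'] _ ((PySem.Chars.find_eq_neg_one_iff _ _).mp h)]
      rfl
    · rw [if_neg h]
      have hf0 : 0 ≤ PySem.Chars.find (cs.drop pos) [':', ':'] := by
        have := PySem.Chars.neg_one_le_find (cs.drop pos) [':', ':']
        omega
      set f := PySem.Chars.find (cs.drop pos) [':', ':'] with hfdef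
      obtain ⟨hpre, hmin⟩ := PySem.Chars.find_spec hf0
      set k := f.toNat with hkdef
      have hlen2 : pos + k + 2 ≤ cs.length := by
        have h1 := hpre.length_le
        simp only [List.drop_drop, List.length_drop, List.length_cons, List.length_nil] at h1
        omega
      have hmsp := msp_first_occ ':' [':'] k (cs.drop pos) hpre hmin
      rw [hmsp]
      rw [if_neg (by omega)]
      simp only [List.length_cons, List.length_nil] at hmsp ⊢
      have htake : (List.take k (cs.drop pos)).length = k := by
        simp [List.length_take, List.length_drop]; omega
      have hanat : ((pos:Int) + f).toNat = pos + k := by omega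
      have hdd : List.drop (k + 1 + 1) (List.drop pos cs) = List.drop (pos + k + 2) cs := by
        rw [List.drop_drop]; ring_nf
      rw [hdd]
      obtain ⟨b, t, hb⟩ : ∃ b t, msp ':' [':'] (List.drop (pos + k + 2) cs) = b :: t := by
        rcases hx : msp ':' [':'] (List.drop (pos + k + 2) cs) with _ | ⟨b, t⟩
        · exact absurd hx (msp_ne_nil _ _ _)
        · exact ⟨b, t, rfl⟩
      rw [hb, ph2, htake, hanat]
      congr 1
      · by_cases hz : pos + k = 0
        · rw [if_neg (by omega), if_neg (by omega)]
        · rw [if_pos (by omega), if_pos (by omega)]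
      · rw [ih (pos + k + 2) (by omega) (by omega), hb]

theorem L1 (cs : List Char) :
    ∀ fuel pos, pos ≤ cs.length → cs.length - pos + 2 ≤ fuel →
      iterAuxA cs ['/'] pos fuel = ph1 cs pos (msp '/' [] (cs.drop pos)) := by
  intro fuel
  induction fuel with
  | zero => intro pos h1 h2; omega
  | succ fuel ih =>
    intro pos hpos hfuel
    rw [iterAuxA]
    rw [PySem.Chars.findFrom_natCast cs ['/'] pos hpos]
    by_cases h : PySem.Chars.find (cs.drop pos) ['/'] = -1
    · rw [if_pos (by rw [h]; rfl)]
      rw [if_pos rfl]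
      rw [msp_no_occ '/' [] _ ((PySem.Chars.find_eq_neg_one_iff _ _).mp h)]
      rw [ph1]
      exact L2 cs fuel pos hpos (by omega)
    · rw [if_neg h]
      have hf0 : 0 ≤ PySem.Chars.find (cs.drop pos) ['/'] := by
        have := PySem.Chars.neg_one_le_find (cs.drop pos) ['/']
        omega
      set f := PySem.Chars.find (cs.drop pos) ['/'] with hfdef
      obtain ⟨hpre, hmin⟩ := PySem.Chars.find_spec hf0
      set k := f.toNat with hkdef
      have hlen2 : pos + k + 1 ≤ cs.length := by
        have h1 := hpre.length_le
        simp only [List.drop_drop, List.length_drop, List.length_cons, List.length_nil] at h1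
        omega
      have hmsp := msp_first_occ '/' [] k (cs.drop pos) hpre hmin
      rw [hmsp]
      rw [if_neg (by omega)]
      simp only [List.length_cons, List.length_nil] at hmsp ⊢
      have htake : (List.take k (cs.drop pos)).length = k := by
        simp [List.length_take, List.length_drop]; omega
      have hanat : ((pos:Int) + f).toNat = pos + k := by omega
      have hdd : List.drop (k + 0 + 1) (List.drop pos cs) = List.drop (pos + k + 1) cs := by
        rw [List.drop_drop]; ring_nf
      rw [hdd]
      obtain ⟨b, t, hb⟩ : ∃ b t, msp '/' [] (List.drop (pos + k + 1) cs) = b :: t := by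
        rcases hx : msp '/' [] (List.drop (pos + k + 1) cs) with _ | ⟨b, t⟩
        · exact absurd hx (msp_ne_nil _ _ _)
        · exact ⟨b, t, rfl⟩
      rw [hb, ph1, htake, hanat]
      congr 1
      · by_cases hz : pos + k = 0
        · rw [if_neg (by omega), if_neg (by omega)]
        · rw [if_pos (by omega), if_pos (by omega)]
      · rw [ih (pos + k + 1) (by omega) (by omega), hb]


theorem E2 (cs head : List Char) :
    ∀ (pieces : List (List Char)) (cur : Option (List Char)) (pos : Nat),
      pos ≤ cs.length →
      cs.take pos = head ++ (match cur with | none => [] | some c => c ++ [':', ':']) →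
      (match cur with | none => pos = head.length | some c => pos = head.length + c.length + 2) →
      cs.drop pos = PySem.Chars.join [':', ':'] pieces →
      pieces ≠ [] →
      ph2 cs pos pieces = altLoop2 head pieces.dropLast cur ++ (if cs ≠ [] then [cs] else []) := by
  intro pieces
  induction pieces with
  | nil => intro cur pos _ _ _ _ hne; exact absurd rfl hne
  | cons piece rest ih =>
    intro cur pos hpos htak hrel hj _
    rcases rest with _ | ⟨next, rest⟩
    · simp [ph2, altLoop2]
    · rw [PySem.Chars.join_cons_cons] at hj
      have hdropmid : List.drop (pos + piece.length) cs = [':', ':'] ++ PySem.Chars.join [':', ':'] (next :: rest) := by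
        rw [← List.drop_drop, hj, List.append_assoc, List.drop_left]
      have hlenlow : pos + piece.length + 2 ≤ cs.length := by
        have := congrArg List.length hdropmid
        simp only [List.length_drop, List.length_append, List.length_cons, List.length_nil] at this
        omega
      have htake1 : cs.take (pos + piece.length) = cs.take pos ++ piece := by
        rw [List.take_add, hj]
        congr 1
        rw [List.append_assoc]
        exact List.take_left
      have htake2 : cs.take (pos + piece.length + 2) = cs.take (pos + piece.length) ++ [':', ':'] := by
        rw [List.take_add, hdropmid]
        simp
      rw [ph2, List.dropLast_cons₂]
      rcases cur with _ | c
      · simp only at htak hrel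
        simp only [altLoop2]
        have hval : cs.take (pos + piece.length) = head ++ piece := by
          rw [htake1, htak]; simp
        have hcond : (pos + piece.length ≠ 0) ↔ (head ≠ [] ∨ piece ≠ []) := by
          rw [hrel]
          simp only [ne_eq, ← List.length_eq_zero_iff]
          omega
        rw [ih (some piece) (pos + piece.length + 2) (by omega)
            (by rw [htake2, hval, List.append_assoc])
            (by simp only []; simp [hrel])
            (by rw [← List.drop_drop, hdropmid]; simp)
            (List.cons_ne_nil _ _)]
        rw [← List.append_assoc]
        congr 1
        by_cases hc : pos + piece.length ≠ 0
        · rw [if_pos hc, if_pos (hcond.mp hc), hval]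
        · rw [if_neg hc, if_neg (fun hx => hc (hcond.mpr hx))]
      · simp only at htak hrel
        simp only [altLoop2]
        have hval : cs.take (pos + piece.length) = head ++ (c ++ [':', ':'] ++ piece) := by
          rw [htake1, htak]; simp
        have hcond : (pos + piece.length ≠ 0) ↔ (head ≠ [] ∨ c ++ [':', ':'] ++ piece ≠ []) := by
          constructor
          · intro _; right; simp
          · intro _; omega
        rw [ih (some (c ++ [':', ':'] ++ piece)) (pos + piece.length + 2) (by omega)
            (by rw [htake2, hval, List.append_assoc])
            (by simp only []; simp [hrel]; omega)
            (by rw [← List.drop_drop, hdropmid]; simp)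
            (List.cons_ne_nil _ _)]
        rw [← List.append_assoc]
        congr 1
        by_cases hc : pos + piece.length ≠ 0
        · rw [if_pos hc, if_pos (hcond.mp hc), hval]
        · rw [if_neg hc, if_neg (fun hx => hc (hcond.mpr hx))]


theorem E1 (cs : List Char) :
    ∀ (pieces : List (List Char)) (cur : Option (List Char)) (pos : Nat),
      pos ≤ cs.length →
      cs.take pos = (match cur with | none => [] | some c => c ++ ['/']) →
      (match cur with | none => pos = 0 | some c => pos = c.length + 1) →
      cs.drop pos = PySem.Chars.join ['/'] pieces →
      pieces ≠ [] →
      ph1 cs pos pieces =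
        altLoop1 pieces.dropLast cur
          ++ ph2 cs (cs.length - (pieces.getLast?.getD []).length)
               (msp ':' [':'] (cs.drop (cs.length - (pieces.getLast?.getD []).length))) := by
  intro pieces
  induction pieces with
  | nil => intro cur pos _ _ _ _ hne; exact absurd rfl hne
  | cons piece rest ih =>
    intro cur pos hpos htak hrel hj _
    rcases rest with _ | ⟨next, rest⟩
    · rw [PySem.Chars.join_singleton] at hj
      have hlen : cs.length - pos = piece.length := by
        have := congrArg List.length hj
        simpa using this
      have hpos' : pos = cs.length - ([piece].getLast?.getD []).length := by
        simp only [List.getLast?_singleton, Option.getD_some]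
        omega
      rw [ph1, List.dropLast_singleton, altLoop1, ← hpos']
      rfl
    · rw [PySem.Chars.join_cons_cons] at hj
      have hdropmid : List.drop (pos + piece.length) cs = ['/'] ++ PySem.Chars.join ['/'] (next :: rest) := by
        rw [← List.drop_drop, hj, List.append_assoc, List.drop_left]
      have hlenlow : pos + piece.length + 1 ≤ cs.length := by
        have := congrArg List.length hdropmid
        simp only [List.length_drop, List.length_append, List.length_cons, List.length_nil] at this
        omega
      have htake1 : cs.take (pos + piece.length) = cs.take pos ++ piece := by
        rw [List.take_add, hj]
        congr 1
        rw [List.append_assoc]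
        exact List.take_left
      have htake2 : cs.take (pos + piece.length + 1) = cs.take (pos + piece.length) ++ ['/'] := by
        rw [List.take_add, hdropmid]
        simp
      rw [ph1, List.dropLast_cons₂, List.getLast?_cons_cons]
      rcases cur with _ | c
      · simp only at htak hrel
        simp only [altLoop1]
        have hval : cs.take (pos + piece.length) = piece := by
          rw [htake1, htak]; simp
        have hcond : (pos + piece.length ≠ 0) ↔ (piece ≠ []) := by
          rw [hrel]
          simp only [ne_eq, ← List.length_eq_zero_iff]
          omega
        rw [ih (some piece) (pos + piece.length + 1) (by omega)
            (by rw [htake2, hval])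
            (by simp [hrel])
            (by rw [← List.drop_drop, hdropmid]; simp)
            (List.cons_ne_nil _ _)]
        rw [← List.append_assoc]
        congr 1
        by_cases hc : pos + piece.length ≠ 0
        · rw [if_pos hc, if_pos (hcond.mp hc), hval]
        · rw [if_neg hc, if_neg (fun hx => hc (hcond.mpr hx))]
      · simp only at htak hrel
        simp only [altLoop1]
        have hval : cs.take (pos + piece.length) = c ++ ['/'] ++ piece := by
          rw [htake1, htak]
        have hcond : (pos + piece.length ≠ 0) ↔ (c ++ ['/'] ++ piece ≠ []) := by
          constructor
          · intro _; simp
          · intro _; omega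
        rw [ih (some (c ++ ['/'] ++ piece)) (pos + piece.length + 1) (by omega)
            (by rw [htake2, hval])
            (by simp only []; simp [hrel]; omega)
            (by rw [← List.drop_drop, hdropmid]; simp)
            (List.cons_ne_nil _ _)]
        rw [← List.append_assoc]
        congr 1
        by_cases hc : pos + piece.length ≠ 0
        · rw [if_pos hc, if_pos (hcond.mp hc), hval]
        · rw [if_neg hc, if_neg (fun hx => hc (hcond.mpr hx))]

theorem pyGet_neg_one {α : Type} (xs : List α) (h : xs ≠ []) :
    PySem.List.pyGet? xs (-1) = xs.getLast? := by
  have hlen : 1 ≤ xs.length := List.length_pos_of_ne_nil h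
  simp only [PySem.List.pyGet?, PySem.List.pyIdx?]
  rw [if_neg (by omega), if_pos (by exact_mod_cast by omega)]
  rw [List.getLast?_eq_getElem?]
  rfl

theorem suffix_drop {α : Type} (l cs : List α) (h : l <:+ cs) :
    cs.drop (cs.length - l.length) = l := by
  obtain ⟨t, ht⟩ := h
  subst ht
  simp only [List.length_append]
  have : t.length + l.length - l.length = t.length := by omega
  rw [this]
  exact List.drop_left

theorem core (cs : List Char) :
    iterAuxA cs ['/'] 0 (2 * cs.length + 2)
      = altLoop1 ((PySem.Chars.splitOn cs ['/']).dropLast) none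
        ++ (altLoop2
              (PySem.List.slice cs none (some ((cs.length : Int) - ((((PySem.List.pyGet? (PySem.Chars.splitOn cs ['/']) (-1)).getD []).length : Int)))))
              ((PySem.Chars.splitOn ((PySem.List.pyGet? (PySem.Chars.splitOn cs ['/']) (-1)).getD []) [':', ':']).dropLast) none
            ++ (if cs ≠ [] then [cs] else [])) := by
  have hsp : PySem.Chars.splitOn cs ['/'] = msp '/' [] cs := splitOn_eq_msp '/' [] cs
  have hne : msp '/' [] cs ≠ [] := msp_ne_nil '/' [] cs
  have hget : (PySem.List.pyGet? (PySem.Chars.splitOn cs ['/']) (-1)).getD []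
      = (msp '/' [] cs).getLast?.getD [] := by
    rw [hsp, pyGet_neg_one _ hne]
  set last := (msp '/' [] cs).getLast?.getD [] with hlastdef
  have hjoin : PySem.Chars.join ['/'] (msp '/' [] cs) = cs := join_msp '/' [] cs
  have hsuf : last <:+ cs := by
    have := getLast_suffix_join ['/'] (msp '/' [] cs) hne
    rwa [hjoin] at this
  have hlastlen : last.length ≤ cs.length := hsuf.length_le
  have hdroplast : cs.drop (cs.length - last.length) = last := suffix_drop last cs hsuf
  have hslice : PySem.List.slice cs none (some ((cs.length : Int) - (last.length : Int)))
      = cs.take (cs.length - last.length) := by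
    rw [PySem.List.slice_to cs (by omega)]
    congr 1
    omega
  rw [L1 cs (2 * cs.length + 2) 0 (by omega) (by omega)]
  rw [List.drop_zero]
  rw [E1 cs (msp '/' [] cs) none 0 (by omega) (by simp) rfl (by simp [hjoin]) hne]
  rw [hget, hsp, ← hlastdef, hdroplast]
  rw [E2 cs (cs.take (cs.length - last.length)) (msp ':' [':'] last) none
        (cs.length - last.length) (by omega)
        (by simp)
        (by simp only []; rw [List.length_take]; omega)
        (by rw [hdroplast, join_msp])
        (msp_ne_nil _ _ _)]
  rw [hslice, splitOn_eq_msp]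

-- ===== VERDICT (by name: the statement is the Claim_ definition above) =====
theorem iterparentnodeids_spec : Claim_equal_iterparentnodeids := by
  intro nodeid _
  unfold Spec_iterparentnodeids iterparentnodeids iterparentnodeids_alt
  dsimp only
  rw [core nodeid.toList]
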